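-- pv_equiv track=rewrite | github.com/oscarnieves100/asr-optim-hiring | amadeus_task_oscar_nieves.py | SkipEmpty
-- ===== SOURCE A (Python) =====
-- def SkipEmpty(InputList):
--     output = []
--     for i in range(len(InputList)):
--         if output == [] and InputList[i] == []:
--             continue #skip iteration if InputList[i] is empty
--         else:
--             output.append(InputList[i])
--     return output
-- ===== SOURCE B (Python) =====
-- def SkipEmpty(InputList):
--     start = 0
--     while start < len(InputList) and InputList[start] == []:
--         start += 1
--     return list(InputList[start:])
-- ===== Notes on version B (the rewrite author's own statement) =====
-- stated objective: simpler
-- what changed: Instead of A's element-by-element conditional append that re-checks whether the output is still empty on every iteration, B scans once for the index of the first non-empty element and returns the suffix in one bulk slice.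
import Mathlib
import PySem

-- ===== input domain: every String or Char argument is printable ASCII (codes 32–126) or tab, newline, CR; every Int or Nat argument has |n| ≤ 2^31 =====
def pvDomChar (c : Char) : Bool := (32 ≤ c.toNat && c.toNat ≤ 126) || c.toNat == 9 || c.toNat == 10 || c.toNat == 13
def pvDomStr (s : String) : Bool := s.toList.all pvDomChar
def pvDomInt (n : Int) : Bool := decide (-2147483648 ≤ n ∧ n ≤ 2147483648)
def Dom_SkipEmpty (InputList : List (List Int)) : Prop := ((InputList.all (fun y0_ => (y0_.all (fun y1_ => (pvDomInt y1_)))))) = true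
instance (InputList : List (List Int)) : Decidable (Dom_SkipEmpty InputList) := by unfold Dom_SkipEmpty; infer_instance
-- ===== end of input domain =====

-- B replaces A's per-element conditional append (re-checking output == [] every step)
-- with a scan for the first non-empty element followed by one bulk suffix copy (simpler).

-- ===== PORT A =====
-- A: output = []; for each element x: if output == [] and x == [] skip else append x.
def SkipEmpty (InputList : List (List Int)) : List (List Int) :=
  InputList.foldl
    (fun output x => if output = [] ∧ x = [] then output else output ++ [x])
    []

-- ===== PORT B =====
-- B helper: the while loop counting leading [] elements (the value of `start`).
def skipEmptyStart : List (List Int) → Nat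
  | [] => 0
  | x :: xs => if x = [] then skipEmptyStart xs + 1 else 0

def SkipEmpty_alt (InputList : List (List Int)) : List (List Int) :=
  InputList.drop (skipEmptyStart InputList)

-- ===== PRECONDITION & SPEC =====
def Spec_SkipEmpty (InputList : List (List Int)) (out : List (List Int)) : Prop := out = SkipEmpty_alt InputList
instance (InputList : List (List Int)) (out : List (List Int)) : Decidable (Spec_SkipEmpty InputList out) := by unfold Spec_SkipEmpty; infer_instance

-- ===== CLAIM (what is proved, stated in full; the proofs are below) =====
def Claim_equal_SkipEmpty : Prop := ∀ (InputList : List (List Int)), Dom_SkipEmpty InputList → Spec_SkipEmpty InputList (SkipEmpty InputList)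

-- ===== LEMMAS AND PROOFS =====
-- Once output is non-empty, A's fold just appends every remaining element.
theorem skipEmpty_foldl_ne_nil (l : List (List Int)) (acc : List (List Int)) (h : acc ≠ []) :
    l.foldl (fun output x => if output = [] ∧ x = [] then output else output ++ [x]) acc = acc ++ l := by
  induction l generalizing acc with
  | nil => simp
  | cons x xs ih =>
    simp only [List.foldl_cons]
    rw [if_neg (by simp [h])]
    rw [ih (acc ++ [x]) (by simp)]
    simp

theorem skipEmpty_eq_alt (l : List (List Int)) :
    SkipEmpty l = SkipEmpty_alt l := by
  unfold SkipEmpty SkipEmpty_alt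
  induction l with
  | nil => simp [skipEmptyStart]
  | cons x xs ih =>
    by_cases hx : x = []
    · subst hx
      simpa [skipEmptyStart] using ih
    · simp only [List.foldl_cons, skipEmptyStart, if_neg hx]
      rw [if_neg (by simp [hx])]
      rw [show ([]:List (List Int)) ++ [x] = [x] from rfl, skipEmpty_foldl_ne_nil xs [x] (by simp)]
      simp

-- ===== VERDICT (by name: the statement is the Claim_ definition above) =====
theorem SkipEmpty_spec : Claim_equal_SkipEmpty := by
  intro l _
  unfold Spec_SkipEmpty
  exact skipEmpty_eq_alt l
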